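-- pv_equiv track=rewrite | github.com/neddul/advent-of-code | 2023/1112/cosmicexpansion.py | galaxy_locations
-- ===== SOURCE A (Python) =====
-- def galaxy_locations(universe, space_size=1):
--     galaxies = []
--     offsety = 0
--     for i in range(len(universe)):
--         offsetx = 0
--         m = len(universe[i])
--         for j in range(m):
--             if universe[i][j] not in {'.', '#'}:
--                 offsetx+=1
--             if universe[i][j] == '#': #A galaxy
--                 space_size_offset = space_size - 1 if space_size > 1 else space_size
--                 galaxies.append((i+offsety*(space_size_offset), j+offsetx*(space_size_offset)))
--             if offsetx == m:
--                 offsety+=1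
--     return galaxies
-- ===== SOURCE B (Python) =====
-- def galaxy_locations(universe, space_size=1):
--     sso = space_size - 1 if space_size > 1 else space_size
--     row_off = []
--     acc = 0
--     for row in universe:
--         row_off.append(acc)
--         if row and all(c != '.' and c != '#' for c in row):
--             acc += 1
--     out = []
--     for i, row in enumerate(universe):
--         for j, c in enumerate(row):
--             if c == '#':
--                 colshift = len([c2 for c2 in row[:j] if c2 != '.' and c2 != '#'])
--                 out.append((i + row_off[i] * sso, j + colshift * sso))
--     return out
-- ===== Notes on version B (the rewrite author's own statement) =====
-- stated objective: alternative
-- what changed: Replaces A's single stateful sweep (running offsetx/offsety counters threaded through nested loops) with a separate prefix pass building a row-offset table plus a per-galaxy recount of marker cells in the row prefix.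
import Mathlib
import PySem

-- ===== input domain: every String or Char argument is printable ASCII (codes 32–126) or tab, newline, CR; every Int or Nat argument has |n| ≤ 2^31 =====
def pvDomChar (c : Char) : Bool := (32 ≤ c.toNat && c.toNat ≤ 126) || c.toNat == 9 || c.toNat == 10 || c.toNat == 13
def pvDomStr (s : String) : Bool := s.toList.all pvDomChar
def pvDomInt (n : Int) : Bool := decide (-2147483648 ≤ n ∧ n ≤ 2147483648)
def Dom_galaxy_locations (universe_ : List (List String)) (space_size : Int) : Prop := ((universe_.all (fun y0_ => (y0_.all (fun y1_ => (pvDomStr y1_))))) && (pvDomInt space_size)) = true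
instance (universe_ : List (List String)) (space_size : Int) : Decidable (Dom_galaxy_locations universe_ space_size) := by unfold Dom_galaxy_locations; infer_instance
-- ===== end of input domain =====

-- B replaces A's single stateful sweep (running offsetx/offsety counters) with a prefix row-offset
-- table plus a per-galaxy recount of marker cells in the row prefix (objective: alternative).

-- ===== PORT A =====
-- the body of A's inner loop over j (state: galaxies, offsetx, offsety)
def aInner (i m ss : Int) (st : List (Int × Int) × Int × Int) (p : Int × String) : List (Int × Int) × Int × Int :=
  let c := p.2
  let offsetx := if ¬(c = "." ∨ c = "#") then st.2.1 + 1 else st.2.1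
  let galaxies :=
    if c = "#" then
      let sso := if ss > 1 then ss - 1 else ss
      st.1 ++ [(i + st.2.2 * sso, p.1 + offsetx * sso)]
    else st.1
  let offsety := if offsetx = m then st.2.2 + 1 else st.2.2
  (galaxies, offsetx, offsety)

-- the body of A's outer loop over i (state: galaxies, offsety)
def aOuter (u : List (List String)) (ss : Int) (st : List (Int × Int) × Int) (i : Int) : List (Int × Int) × Int :=
  let row := PySem.List.pyGetD u i []
  let m : Int := PySem.List.len row
  let r := (PySem.List.pyRange 0 m).foldl (fun st2 j => aInner i m ss st2 (j, PySem.List.pyGetD row j "")) (st.1, 0, st.2)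
  (r.1, r.2.2)

def galaxy_locations (universe_ : List (List String)) (space_size : Int) : List (Int × Int) :=
  ((PySem.List.pyRange 0 (PySem.List.len universe_)).foldl (aOuter universe_ space_size) ([], 0)).1

-- ===== PORT B =====
def bMarker (c : String) : Bool := !(c == "." || c == "#")

def bRowFull (row : List String) : Bool := !row.isEmpty && row.all bMarker

-- first pass: row_off.append(acc); acc += 1 on all-marker non-empty rows
def bScan (st : List Int × Int) (row : List String) : List Int × Int :=
  (st.1 ++ [st.2], if bRowFull row then st.2 + 1 else st.2)

-- inner loop body: on '#', recount markers in row[:j] and append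
def bInner (row : List String) (i sso yoff : Int) (out : List (Int × Int)) (q : Int × String) : List (Int × Int) :=
  if q.2 = "#" then
    let colshift : Int := (((row.take q.1.toNat).filter bMarker).length : Int)
    out ++ [(i + yoff * sso, q.1 + colshift * sso)]
  else out

def galaxy_locations_alt (universe_ : List (List String)) (space_size : Int) : List (Int × Int) :=
  let sso := if space_size > 1 then space_size - 1 else space_size
  let rowOff := (universe_.foldl bScan ([], 0)).1
  (PySem.List.enumerate universe_).foldl
    (fun out p => (PySem.List.enumerate p.2).foldl (bInner p.2 p.1 sso (PySem.List.pyGetD rowOff p.1 0)) out) []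

-- ===== PRECONDITION & SPEC =====
def Spec_galaxy_locations (universe_ : List (List String)) (space_size : Int) (out : List (Int × Int)) : Prop := out = galaxy_locations_alt universe_ space_size
instance (universe_ : List (List String)) (space_size : Int) (out : List (Int × Int)) : Decidable (Spec_galaxy_locations universe_ space_size out) := by unfold Spec_galaxy_locations; infer_instance

-- ===== CLAIM (what is proved, stated in full; the proofs are below) =====
def Claim_equal_galaxy_locations : Prop := ∀ (universe_ : List (List String)) (space_size : Int), Dom_galaxy_locations universe_ space_size → Spec_galaxy_locations universe_ space_size (galaxy_locations universe_ space_size)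

-- ===== LEMMAS AND PROOFS =====

-- number of marker cells ('not in {'.','#'}') in a row prefix
def countM (l : List String) : Int := ((l.filter bMarker).length : Int)

-- the galaxies A and B emit for the suffix of a row, given absolute start index j0,
-- markers already seen x, and the row's offsety value y
def galsSpec (i y sso : Int) : Int → Int → List String → List (Int × Int)
  | _, _, [] => []
  | j0, x, c :: r =>
    (if c = "#" then [(i + y * sso, j0 + (x + (if bMarker c then 1 else 0)) * sso)] else [])
      ++ galsSpec i y sso (j0 + 1) (x + (if bMarker c then 1 else 0)) r

def countFull : List (List String) → Int
  | [] => 0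
  | r :: rest => (if bRowFull r then 1 else 0) + countFull rest

-- galaxies for the suffix of the grid starting at row index i with offsety y
def outSpec (sso : Int) : Int → Int → List (List String) → List (Int × Int)
  | _, _, [] => []
  | i, y, row :: rest =>
    galsSpec i y sso 0 0 row ++ outSpec sso (i + 1) (y + (if bRowFull row then 1 else 0)) rest

def rowOffList : Int → List (List String) → List Int
  | _, [] => []
  | z, row :: rest => z :: rowOffList (z + (if bRowFull row then 1 else 0)) rest

theorem countM_le (l : List String) : countM l ≤ (l.length : Int) := by
  simpa [countM] using (Int.ofNat_le.mpr (List.length_filter_le bMarker l))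

theorem countM_append (l₁ l₂ : List String) :
    countM (l₁ ++ l₂) = countM l₁ + countM l₂ := by
  simp [countM]

theorem full_iff (row : List String) :
    (row ≠ [] ∧ countM row = (row.length : Int)) ↔ bRowFull row = true := by
  constructor
  · rintro ⟨hne, hc⟩
    have hlen : (row.filter bMarker).length = row.length := by
      simp only [countM] at hc; exact_mod_cast hc
    have hfe : row.filter bMarker = row := (List.filter_sublist).eq_of_length hlen
    have hall : ∀ c ∈ row, bMarker c := List.filter_eq_self.mp hfe
    simp [bRowFull, hne, List.all_eq_true]
    exact hall
  · intro h
    simp [bRowFull, List.all_eq_true] at h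
    refine ⟨h.1, ?_⟩
    have hfe : row.filter bMarker = row := List.filter_eq_self.mpr h.2
    simp [countM, hfe]

-- A's inner loop, characterised on a suffix of the row
theorem aInner_fold (i m ss : Int) :
    ∀ (rest : List String) (j0 x y : Int) (g : List (Int × Int)),
    x ≤ j0 → j0 + (rest.length : Int) = m →
    (PySem.List.enumerate rest j0).foldl (aInner i m ss) (g, x, y)
      = (g ++ galsSpec i y (if ss > 1 then ss - 1 else ss) j0 x rest,
         x + countM rest,
         if rest ≠ [] ∧ x + countM rest = m then y + 1 else y) := by
  intro rest
  induction rest with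
  | nil => intro j0 x y g _ _; simp [galsSpec, countM]
  | cons c r ih =>
    intro j0 x y g hx hm
    rw [PySem.List.enumerate_cons, List.foldl_cons]
    have hmark : (if ¬(c = "." ∨ c = "#") then x + 1 else x) = x + (if bMarker c then 1 else 0) := by
      by_cases h : c = "." ∨ c = "#" <;> simp [bMarker, h] <;> tauto
    set x' : Int := x + (if bMarker c then 1 else 0) with hx'
    have hx'le : x' ≤ j0 + 1 := by
      rw [hx']; split <;> omega
    have hstep : aInner i m ss (g, x, y) (j0, c)
        = (g ++ (if c = "#" then [(i + y * (if ss > 1 then ss - 1 else ss), j0 + x' * (if ss > 1 then ss - 1 else ss))] else []),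
           x', if x' = m then y + 1 else y) := by
      simp only [aInner, hmark]
      by_cases h : c = "#" <;> simp [h]
    rw [hstep]
    cases r with
    | nil =>
      have hm1 : m = j0 + 1 := by simp at hm; omega
      have : countM [c] = (if bMarker c then 1 else 0) := by
        by_cases h : bMarker c <;> simp [countM, h]
      simp [galsSpec, this, hm1, hx']
    | cons c2 r2 =>
      have hns : x' ≠ m := by
        have h1 := countM_le (c2 :: r2)
        have : ((c :: c2 :: r2).length : Int) = (c2 :: r2).length + 1 := by push_cast [List.length_cons]; ring
        simp [List.length_cons] at hm
        omega
      have hy : (if x' = m then y + 1 else y) = y := by simp [hns]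
      rw [hy, ih (j0 + 1) x' y _ hx'le (by simp [List.length_cons] at hm ⊢; omega)]
      have hcnt : x + countM (c :: c2 :: r2) = x' + countM (c2 :: r2) := by
        have h2 : countM (c :: c2 :: r2) = countM [c] + countM (c2 :: r2) := by
          have := countM_append [c] (c2 :: r2)
          simpa using this
        have h3 : countM [c] = (if bMarker c then 1 else 0) := by
          by_cases h : bMarker c <;> simp [countM, h]
        omega
      simp [galsSpec, hcnt, hx', List.append_assoc]


-- A's outer loop, characterised on a suffix of the grid
theorem aOuter_fold (u : List (List String)) (ss : Int) :
    ∀ (rest pre : List (List String)) (g : List (Int × Int)) (y : Int),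
    pre ++ rest = u →
    (PySem.List.enumerate rest ((pre.length : Nat) : Int)).foldl
        (fun st (p : Int × List String) => aOuter u ss st p.1) (g, y)
      = (g ++ outSpec (if ss > 1 then ss - 1 else ss) ((pre.length : Nat) : Int) y rest,
         y + countFull rest) := by
  intro rest
  induction rest with
  | nil => intro pre g y _; simp [outSpec, countFull]
  | cons row r ih =>
    intro pre g y hu
    rw [PySem.List.enumerate_cons, List.foldl_cons]
    have hrow : PySem.List.pyGetD u ((pre.length : Nat) : Int) [] = row := by
      rw [PySem.List.pyGetD_natCast, ← hu]
      simp [List.getD]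
    have hstep : aOuter u ss (g, y) ((pre.length : Nat) : Int)
        = (g ++ galsSpec ((pre.length : Nat) : Int) y (if ss > 1 then ss - 1 else ss) 0 0 row,
           y + (if bRowFull row then 1 else 0)) := by
      show (let row' := PySem.List.pyGetD u ((pre.length : Nat) : Int) []
            let m : Int := PySem.List.len row'
            let rr := (PySem.List.pyRange 0 m).foldl
              (fun st2 j => aInner ((pre.length : Nat) : Int) m ss st2 (j, PySem.List.pyGetD row' j "")) (g, 0, y)
            (rr.1, rr.2.2)) = _
      simp only [hrow]
      rw [← List.foldl_map (f := fun j => (j, PySem.List.pyGetD row j "")),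
          ← PySem.List.enumerate_eq_map_pyRange row ""]
      rw [aInner_fold ((pre.length : Nat) : Int) (PySem.List.len row) ss row 0 0 y g
            (by positivity) (by simp [PySem.List.len])]
      simp only []
      congr 1
      by_cases h : bRowFull row = true
      · have h2 := (full_iff row).mpr h
        simp [h, h2.1, h2.2, PySem.List.len]
      · have hnot : ¬(row ≠ [] ∧ countM row = (row.length : Int)) := fun hc => h ((full_iff row).mp hc)
        have hb : (if bRowFull row then (1:Int) else 0) = 0 := by simp [h]
        rw [hb]
        simp [PySem.List.len]
        intro h1 h2
        exact absurd ⟨h1, h2⟩ hnot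
    rw [hstep]
    have hlen : (((pre ++ [row]).length : Nat) : Int) = ((pre.length : Nat) : Int) + 1 := by
      push_cast [List.length_append, List.length_cons, List.length_nil]; ring
    have := ih (pre ++ [row]) (g ++ galsSpec ((pre.length : Nat) : Int) y (if ss > 1 then ss - 1 else ss) 0 0 row)
      (y + (if bRowFull row then 1 else 0)) (by simpa using hu)
    rw [hlen] at this
    rw [this]
    simp [outSpec, countFull, List.append_assoc]
    omega

theorem countFull_append (a b : List (List String)) :
    countFull (a ++ b) = countFull a + countFull b := by
  induction a with
  | nil => simp [countFull]
  | cons r a ih => simp [countFull, ih]; ring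

theorem bScan_fold :
    ∀ (u : List (List String)) (acc : List Int) (z : Int),
    u.foldl bScan (acc, z) = (acc ++ rowOffList z u, z + countFull u) := by
  intro u
  induction u with
  | nil => intro acc z; simp [rowOffList, countFull]
  | cons row r ih =>
    intro acc z
    rw [List.foldl_cons]
    show List.foldl bScan (acc ++ [z], if bRowFull row then z + 1 else z) r = _
    have hz : (if bRowFull row then z + 1 else z) = z + (if bRowFull row then 1 else 0) := by
      split <;> ring
    rw [hz, ih]
    simp [rowOffList, countFull, List.append_assoc]
    ring

theorem rowOff_get :
    ∀ (pre : List (List String)) (row : List String) (rest : List (List String)) (z : Int),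
    (rowOffList z (pre ++ row :: rest)).getD pre.length 0 = z + countFull pre := by
  intro pre
  induction pre with
  | nil => intro row rest z; simp [rowOffList, countFull]
  | cons p pre' ih =>
    intro row rest z
    show (rowOffList (z + (if bRowFull p then 1 else 0)) (pre' ++ row :: rest)).getD pre'.length 0 = _
    rw [ih]
    simp [countFull]
    ring

-- B's inner loop, characterised on a suffix of the row
theorem bInner_fold (row : List String) (I sso yoff : Int) :
    ∀ (rest pre : List String) (out : List (Int × Int)),
    pre ++ rest = row →
    (PySem.List.enumerate rest ((pre.length : Nat) : Int)).foldl (bInner row I sso yoff) out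
      = out ++ galsSpec I yoff sso ((pre.length : Nat) : Int) (countM pre) rest := by
  intro rest
  induction rest with
  | nil => intro pre out _; simp [galsSpec]
  | cons c r ih =>
    intro pre out hu
    rw [PySem.List.enumerate_cons, List.foldl_cons]
    have htake : row.take (((pre.length : Nat) : Int)).toNat = pre := by
      rw [← hu, Int.toNat_natCast, List.take_left]
    have hstep : bInner row I sso yoff out (((pre.length : Nat) : Int), c)
        = out ++ (if c = "#" then [(I + yoff * sso, ((pre.length : Nat) : Int) + (countM pre + (if bMarker c then 1 else 0)) * sso)] else []) := by
      by_cases h : c = "#"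
      · subst h
        simp only [bInner, htake]
        norm_num [countM, bMarker]
      · simp [bInner, h]
    rw [hstep]
    have hlen : (((pre ++ [c]).length : Nat) : Int) = ((pre.length : Nat) : Int) + 1 := by
      push_cast [List.length_append, List.length_cons, List.length_nil]; ring
    have hcm : countM (pre ++ [c]) = countM pre + (if bMarker c then 1 else 0) := by
      rw [countM_append]
      by_cases h : bMarker c <;> simp [countM, h]
    have := ih (pre ++ [c]) (out ++ (if c = "#" then [(I + yoff * sso, ((pre.length : Nat) : Int) + (countM pre + (if bMarker c then 1 else 0)) * sso)] else [])) (by simpa using hu)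
    rw [hlen, hcm] at this
    rw [this]
    simp [galsSpec, List.append_assoc]

-- B's outer loop, characterised on a suffix of the grid
theorem bOuter_fold (u : List (List String)) (sso : Int) :
    ∀ (rest pre : List (List String)) (out : List (Int × Int)),
    pre ++ rest = u →
    (PySem.List.enumerate rest ((pre.length : Nat) : Int)).foldl
        (fun out (p : Int × List String) =>
          (PySem.List.enumerate p.2).foldl (bInner p.2 p.1 sso (PySem.List.pyGetD (rowOffList 0 u) p.1 0)) out) out
      = out ++ outSpec sso ((pre.length : Nat) : Int) (countFull pre) rest := by
  intro rest
  induction rest with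
  | nil => intro pre out _; simp [outSpec]
  | cons row r ih =>
    intro pre out hu
    rw [PySem.List.enumerate_cons, List.foldl_cons]
    have hoff : PySem.List.pyGetD (rowOffList 0 u) ((pre.length : Nat) : Int) 0 = countFull pre := by
      rw [PySem.List.pyGetD_natCast, ← hu, rowOff_get]
      ring
    have hinner : (PySem.List.enumerate row).foldl
        (bInner row ((pre.length : Nat) : Int) sso (PySem.List.pyGetD (rowOffList 0 u) ((pre.length : Nat) : Int) 0)) out
        = out ++ galsSpec ((pre.length : Nat) : Int) (countFull pre) sso 0 0 row := by
      rw [hoff]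
      have h0 : ((((([] : List String)).length : Nat)) : Int) = 0 := by simp
      have := bInner_fold row ((pre.length : Nat) : Int) sso (countFull pre) row [] out rfl
      rw [h0] at this
      simpa [countM] using this
    simp only [hinner]
    have hlen : (((pre ++ [row]).length : Nat) : Int) = ((pre.length : Nat) : Int) + 1 := by
      push_cast [List.length_append, List.length_cons, List.length_nil]; ring
    have hcf : countFull (pre ++ [row]) = countFull pre + (if bRowFull row then 1 else 0) := by
      rw [countFull_append]; simp [countFull]
    have := ih (pre ++ [row]) (out ++ galsSpec ((pre.length : Nat) : Int) (countFull pre) sso 0 0 row) (by simpa using hu)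
    rw [hlen, hcf] at this
    rw [this]
    simp [outSpec, List.append_assoc]

theorem a_eq_spec (u : List (List String)) (ss : Int) :
    galaxy_locations u ss = outSpec (if ss > 1 then ss - 1 else ss) 0 0 u := by
  show ((PySem.List.pyRange 0 (PySem.List.len u)).foldl (aOuter u ss) ([], 0)).1 = _
  rw [← List.foldl_map (f := fun j => (j, PySem.List.pyGetD u j [])) (g := fun st (p : Int × List String) => aOuter u ss st p.1),
      ← PySem.List.enumerate_eq_map_pyRange u []]
  have h0 : ((((([] : List (List String))).length : Nat)) : Int) = 0 := by simp
  have := aOuter_fold u ss u [] [] 0 rfl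
  rw [h0] at this
  rw [this]
  simp

theorem b_eq_spec (u : List (List String)) (ss : Int) :
    galaxy_locations_alt u ss = outSpec (if ss > 1 then ss - 1 else ss) 0 0 u := by
  show (PySem.List.enumerate u).foldl
      (fun out (p : Int × List String) =>
        (PySem.List.enumerate p.2).foldl
          (bInner p.2 p.1 (if ss > 1 then ss - 1 else ss) (PySem.List.pyGetD ((u.foldl bScan ([], 0)).1) p.1 0)) out) [] = _
  rw [bScan_fold u [] 0]
  have h0 : ((((([] : List (List String))).length : Nat)) : Int) = 0 := by simp
  have := bOuter_fold u (if ss > 1 then ss - 1 else ss) u [] [] rfl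
  rw [h0] at this
  simp only [List.nil_append] at this ⊢
  rw [this]
  simp [countFull]

-- ===== VERDICT (by name: the statement is the Claim_ definition above) =====
theorem galaxy_locations_spec : Claim_equal_galaxy_locations := by
  intro u ss _
  unfold Spec_galaxy_locations
  rw [a_eq_spec, b_eq_spec]
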